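-- pv_equiv track=rewrite | github.com/ak2k2/Connect-Four-Alpha-Beta-AI | connect_four.py | count_sequnces
-- ===== SOURCE A (Python) =====
-- def count_sequnces(arr: list, player: int, seq_len: int):
--     num_seq = 0
--     streak = 0
--     for p in arr:
--         if p == player:
--             streak += 1
--             if streak == seq_len:
--                 num_seq += 1
--         else:
--             streak = 0
--     return num_seq
-- ===== SOURCE B (Python) =====
-- def count_sequnces(arr: list, player: int, seq_len: int):
--     # Run-based: scan maximal runs of equal values; count player runs of length >= seq_len.
--     if seq_len <= 0:
--         return 0
--     count = 0
--     i = 0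
--     n = len(arr)
--     while i < n:
--         j = i
--         while j < n and arr[j] == arr[i]:
--             j += 1
--         if arr[i] == player and j - i >= seq_len:
--             count += 1
--         i = j
--     return count
-- ===== Notes on version B (the rewrite author's own statement) =====
-- stated objective: alternative
-- what changed: Replaces the streak-counter fold with a run-decomposition scan: split the list into maximal runs of equal consecutive values and count player runs of length >= seq_len (with an explicit seq_len <= 0 guard).
import Mathlib
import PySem

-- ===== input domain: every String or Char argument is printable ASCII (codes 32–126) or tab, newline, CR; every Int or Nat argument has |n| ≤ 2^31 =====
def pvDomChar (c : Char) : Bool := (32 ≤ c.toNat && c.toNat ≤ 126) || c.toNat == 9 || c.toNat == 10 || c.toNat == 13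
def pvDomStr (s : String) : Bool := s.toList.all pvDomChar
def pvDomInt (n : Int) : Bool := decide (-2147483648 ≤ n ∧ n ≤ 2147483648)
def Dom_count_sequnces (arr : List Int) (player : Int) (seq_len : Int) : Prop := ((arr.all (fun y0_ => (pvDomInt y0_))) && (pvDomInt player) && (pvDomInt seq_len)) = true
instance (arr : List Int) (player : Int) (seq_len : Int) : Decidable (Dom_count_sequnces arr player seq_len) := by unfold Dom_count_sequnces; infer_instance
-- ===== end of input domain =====

-- ===== PORT A =====
-- B differs from A by a run-decomposition scan instead of a streak counter; same values everywhere (return value only; no mutation).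
def count_sequnces (arr : List Int) (player : Int) (seq_len : Int) : Int :=
  (arr.foldl (fun (st : Int × Int) p =>
      if p = player then
        (if st.2 + 1 = seq_len then st.1 + 1 else st.1, st.2 + 1)
      else (st.1, 0)) (0, 0)).1

-- ===== PORT B =====
-- runs scan: consume one maximal run of equal values per step (Source B's inner while = takeWhile/dropWhile)
def csRuns (player : Int) (seq_len : Int) : List Int → Int
  | [] => 0
  | x :: xs =>
      (if x = player ∧ seq_len ≤ 1 + (xs.takeWhile (· == x)).length then (1 : Int) else 0)
        + csRuns player seq_len (xs.dropWhile (· == x))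
termination_by l => l.length
decreasing_by
  simpa using Nat.lt_succ_of_le (List.length_dropWhile_le _ _)

def count_sequnces_alt (arr : List Int) (player : Int) (seq_len : Int) : Int :=
  if seq_len ≤ 0 then 0 else csRuns player seq_len arr

-- ===== PRECONDITION & SPEC =====
def Spec_count_sequnces (arr : List Int) (player : Int) (seq_len : Int) (out : Int) : Prop := out = count_sequnces_alt arr player seq_len
instance (arr : List Int) (player : Int) (seq_len : Int) (out : Int) : Decidable (Spec_count_sequnces arr player seq_len out) := by unfold Spec_count_sequnces; infer_instance

-- ===== CLAIM (what is proved, stated in full; the proofs are below) =====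
def Claim_equal_count_sequnces : Prop := ∀ (arr : List Int) (player : Int) (seq_len : Int), Dom_count_sequnces arr player seq_len → Spec_count_sequnces arr player seq_len (count_sequnces arr player seq_len)

-- ===== LEMMAS AND PROOFS =====

-- recursive characterisation of A's fold: count of streak-hits starting from streak s
def csFrom (player : Int) (seq_len : Int) : List Int → Int → Int
  | [], _ => 0
  | p :: xs, s =>
      if p = player then (if s + 1 = seq_len then 1 else 0) + csFrom player seq_len xs (s + 1)
      else csFrom player seq_len xs 0

theorem foldl_eq_csFrom (player seq_len : Int) (arr : List Int) (n s : Int) :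
    (arr.foldl (fun (st : Int × Int) p =>
      if p = player then
        (if st.2 + 1 = seq_len then st.1 + 1 else st.1, st.2 + 1)
      else (st.1, 0)) (n, s)).1 = n + csFrom player seq_len arr s := by
  induction arr generalizing n s with
  | nil => simp [csFrom]
  | cons p xs ih =>
      rw [List.foldl_cons]
      by_cases hp : p = player
      · by_cases hs : s + 1 = seq_len
        · rw [if_pos hp, if_pos hs, ih, csFrom, if_pos hp, if_pos hs]; ring
        · rw [if_pos hp, if_neg hs, ih, csFrom, if_pos hp, if_neg hs]; ring
      · rw [if_neg hp, ih, csFrom, if_neg hp]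

-- inside a run of `player` of length L starting from streak s: one hit iff s < seq_len ≤ s + L
theorem csFrom_player_run (player seq_len : Int) (run rest : List Int)
    (hrun : ∀ x ∈ run, x = player) (s : Int) :
    csFrom player seq_len (run ++ rest) s =
      (if s < seq_len ∧ seq_len ≤ s + run.length then 1 else 0)
        + csFrom player seq_len rest (s + run.length) := by
  induction run generalizing s with
  | nil =>
      simp only [List.nil_append, List.length_nil, Nat.cast_zero, add_zero]
      rw [if_neg (by omega), zero_add]
  | cons x run ih =>
      have hx : x = player := hrun x (by simp)
      have h' : ∀ y ∈ run, y = player := fun y hy => hrun y (by simp [hy])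
      rw [List.cons_append, csFrom, if_pos hx, ih h']
      simp only [List.length_cons]
      push_cast
      split_ifs <;> try ring_nf
      all_goals omega

-- a maximal run of non-player values contributes nothing (streak stays reset)
theorem csFrom_other_run (player seq_len : Int) (run rest : List Int)
    (hrun : ∀ x ∈ run, x ≠ player) :
    csFrom player seq_len (run ++ rest) 0 = csFrom player seq_len rest 0 := by
  induction run with
  | nil => rfl
  | cons x run ih =>
      have hx : x ≠ player := hrun x (by simp)
      simp [csFrom, hx, ih (fun y hy => hrun y (by simp [hy]))]

theorem csFrom_rest_zero (player seq_len : Int) (rest : List Int) (s : Int)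
    (h : ∀ y, rest.head? = some y → y ≠ player) :
    csFrom player seq_len rest s = csFrom player seq_len rest 0 := by
  cases rest with
  | nil => rfl
  | cons y ys =>
      have := h y rfl
      simp [csFrom, this]

theorem csFrom_eq_csRuns (player seq_len : Int) (hpos : 0 < seq_len) (arr : List Int) :
    csFrom player seq_len arr 0 = csRuns player seq_len arr := by
  induction arr using csRuns.induct with
  | case1 => simp [csFrom, csRuns]
  | case2 x xs ih =>
      have hsplit : x :: xs = (x :: xs.takeWhile (· == x)) ++ xs.dropWhile (· == x) := by
        simp [List.takeWhile_append_dropWhile]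
      have hhead : ∀ y, (xs.dropWhile (· == x)).head? = some y → y ≠ x := by
        intro y hy
        have := List.head?_dropWhile_not (p := (· == x)) (l := xs)
        rw [hy] at this
        simpa using this
      rw [csRuns]
      by_cases hx : x = player
      · rw [hsplit, csFrom_player_run player seq_len _ _ ?hall 0]
        case hall =>
          intro y hy
          rcases List.mem_cons.1 hy with h | h
          · omega
          · have := List.mem_takeWhile_imp h
            simpa [hx] using this
        rw [csFrom_rest_zero player seq_len _ _
              (by intro y hy; simpa [hx] using hhead y hy), ih]
        simp only [List.length_cons]
        push_cast
        split_ifs <;> first | rfl | omega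
      · rw [hsplit, List.cons_append, csFrom, if_neg hx,
            csFrom_other_run player seq_len _ _ ?hall2, ih]
        case hall2 =>
          intro y hy
          have := List.mem_takeWhile_imp hy
          simp at this
          simpa [this] using hx
        simp [hx]

theorem csFrom_nonpos (player seq_len : Int) (hnp : seq_len ≤ 0) (arr : List Int) (s : Int)
    (hs : 0 ≤ s) : csFrom player seq_len arr s = 0 := by
  induction arr generalizing s with
  | nil => rfl
  | cons p xs ih =>
      by_cases hp : p = player <;> simp [csFrom, hp]
      · rw [if_neg (by omega), ih (s + 1) (by omega)]
        ring
      · exact ih 0 le_rfl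

-- ===== VERDICT (by name: the statement is the Claim_ definition above) =====
theorem count_sequnces_spec : Claim_equal_count_sequnces := by
  intro arr player seq_len _
  unfold Spec_count_sequnces count_sequnces count_sequnces_alt
  rw [foldl_eq_csFrom]
  by_cases h : seq_len ≤ 0
  · simp [h, csFrom_nonpos player seq_len h arr 0 le_rfl]
  · rw [if_neg h, csFrom_eq_csRuns player seq_len (by omega) arr]
    ring
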